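-- pv_equiv track=rewrite | github.com/tripathiji1312/PhantomNode | app/hamming.py | encode_hamming
-- ===== SOURCE A (Python) =====
-- def encode_hamming(bc):
--     """
--     Hamming(7,4) encoding with an extra parity bit → SECDED (8,4).
--     Can correct 1-bit errors AND detect 2-bit errors.
--     """
--     new_bc = ""
--
--     # Pad to multiple of 4
--     while len(bc) % 4 != 0:
--         bc += '0'
--
--     for i in range(0, len(bc), 4):
--         group = bc[i:i + 4]
--         p1 = int(group[0]) ^ int(group[1]) ^ int(group[3])
--         p2 = int(group[0]) ^ int(group[2]) ^ int(group[3])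
--         p3 = int(group[1]) ^ int(group[2]) ^ int(group[3])
--
--         # Standard 7-bit Hamming block
--         block = str(p1) + str(p2) + group[0] + str(p3) + group[1] + group[2] + group[3]
--
--         # Extra overall parity bit for SECDED (detect 2-bit errors)
--         overall_parity = 0
--         for bit in block:
--             overall_parity ^= int(bit)
--         block += str(overall_parity)
--
--         new_bc += block
--
--     return new_bc
-- ===== SOURCE B (Python) =====
-- # 16-entry lookup table: map each 4-bit group directly to its 8-bit SECDED block.
-- _TABLE = {}
-- for _a in (0, 1):
--     for _b in (0, 1):
--         for _c in (0, 1):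
--             for _d in (0, 1):
--                 _p1 = _a ^ _b ^ _d
--                 _p2 = _a ^ _c ^ _d
--                 _p3 = _b ^ _c ^ _d
--                 _key = str(_a) + str(_b) + str(_c) + str(_d)
--                 _TABLE[_key] = (str(_p1) + str(_p2) + str(_a) + str(_p3)
--                                 + str(_b) + str(_c) + str(_d)
--                                 + str(_p1 ^ _p2 ^ _a ^ _p3 ^ _b ^ _c ^ _d))
--
--
-- def encode_hamming(bc):
--     bc = bc + '0' * (-len(bc) % 4)
--     return ''.join(_TABLE[bc[i:i + 4]] for i in range(0, len(bc), 4))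
-- ===== Notes on version B (the rewrite author's own statement) =====
-- stated objective: alternative
-- what changed: Replaces the per-group parity arithmetic and the inner character-by-character parity loop with a precomputed 16-entry lookup table (the overall parity is a closed-form XOR, the padding while-loop a single arithmetic pad, and the output is joined from lookups instead of accumulated string concatenation).
-- outside the precondition, e.g. on encode_hamming('2'): A returns '22200002', B raises KeyError; on encode_hamming('9'): A returns '99900009', B raises KeyError; on encode_hamming('2345'): A returns '43223455', B raises KeyError
import Mathlib
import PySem

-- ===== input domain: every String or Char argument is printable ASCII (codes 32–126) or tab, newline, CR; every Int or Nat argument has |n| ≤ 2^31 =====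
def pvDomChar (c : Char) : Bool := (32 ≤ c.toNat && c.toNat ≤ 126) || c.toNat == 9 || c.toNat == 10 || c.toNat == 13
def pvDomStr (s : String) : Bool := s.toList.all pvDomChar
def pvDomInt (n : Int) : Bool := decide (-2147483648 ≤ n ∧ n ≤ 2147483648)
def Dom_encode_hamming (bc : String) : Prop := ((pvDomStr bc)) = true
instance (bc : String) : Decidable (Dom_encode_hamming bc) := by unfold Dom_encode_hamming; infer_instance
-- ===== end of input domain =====

-- B replaces A's per-group parity arithmetic and inner parity loop by a precomputed 16-entry
-- lookup table, an arithmetic pad instead of the while-loop, and a join instead of string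
-- accumulation (objective: alternative, same asymptotic cost).

-- ===== PORT A =====

-- int(ch) on a one-character string; the .getD default is unreachable under Pre_
-- (Python raises ValueError exactly where ofStr? is none, i.e. on non-digit chars).
def pvIntChar (c : Char) : Int := (PySem.Int.ofStr? (String.ofList [c])).getD 0

-- while len(bc) % 4 != 0: bc += '0'
def padA (l : List Char) : List Char :=
  if l.length % 4 ≠ 0 then padA (l ++ ['0']) else l
termination_by (4 - l.length % 4) % 4
decreasing_by simp [List.length_append]; omega

-- the body of A's for-loop: build one 8-bit SECDED block from a 4-char group
-- (pyGetD's '0' default is unreachable: after padding every group has 4 chars)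
def blockA (g : List Char) : List Char :=
  let p1 := PySem.Int.bxor (PySem.Int.bxor (pvIntChar (PySem.List.pyGetD g 0 '0'))
              (pvIntChar (PySem.List.pyGetD g 1 '0'))) (pvIntChar (PySem.List.pyGetD g 3 '0'))
  let p2 := PySem.Int.bxor (PySem.Int.bxor (pvIntChar (PySem.List.pyGetD g 0 '0'))
              (pvIntChar (PySem.List.pyGetD g 2 '0'))) (pvIntChar (PySem.List.pyGetD g 3 '0'))
  let p3 := PySem.Int.bxor (PySem.Int.bxor (pvIntChar (PySem.List.pyGetD g 1 '0'))
              (pvIntChar (PySem.List.pyGetD g 2 '0'))) (pvIntChar (PySem.List.pyGetD g 3 '0'))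
  let block := (PySem.Int.toStr p1).toList ++ (PySem.Int.toStr p2).toList
      ++ [PySem.List.pyGetD g 0 '0'] ++ (PySem.Int.toStr p3).toList
      ++ [PySem.List.pyGetD g 1 '0'] ++ [PySem.List.pyGetD g 2 '0'] ++ [PySem.List.pyGetD g 3 '0']
  let overall := block.foldl (fun acc c => PySem.Int.bxor acc (pvIntChar c)) 0
  block ++ (PySem.Int.toStr overall).toList

def encode_hamming (bc : String) : String :=
  let l := padA bc.toList
  String.ofList ((PySem.List.pyRange 0 (l.length : Int) 4).foldl
    (fun acc i => acc ++ blockA (PySem.List.slice l (some i) (some (i + 4)))) [])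

-- ===== PORT B =====

-- the 16-entry table built once by four nested loops over (0, 1)
def pvTable : PySem.Dict String String :=
  [(0 : Int), 1].foldl (fun t a =>
    [(0 : Int), 1].foldl (fun t b =>
      [(0 : Int), 1].foldl (fun t c =>
        [(0 : Int), 1].foldl (fun t d =>
          let p1 := PySem.Int.bxor (PySem.Int.bxor a b) d
          let p2 := PySem.Int.bxor (PySem.Int.bxor a c) d
          let p3 := PySem.Int.bxor (PySem.Int.bxor b c) d
          let key := String.ofList ((PySem.Int.toStr a).toList ++ (PySem.Int.toStr b).toList
              ++ (PySem.Int.toStr c).toList ++ (PySem.Int.toStr d).toList)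
          let val := String.ofList ((PySem.Int.toStr p1).toList ++ (PySem.Int.toStr p2).toList
              ++ (PySem.Int.toStr a).toList ++ (PySem.Int.toStr p3).toList
              ++ (PySem.Int.toStr b).toList ++ (PySem.Int.toStr c).toList
              ++ (PySem.Int.toStr d).toList
              ++ (PySem.Int.toStr (PySem.Int.bxor (PySem.Int.bxor (PySem.Int.bxor
                    (PySem.Int.bxor (PySem.Int.bxor (PySem.Int.bxor p1 p2) a) p3) b) c) d)).toList)
          PySem.Dict.insert t key val) t) t) t) PySem.Dict.empty

-- bc += '0' * (-len(bc) % 4); ''.join(_TABLE[bc[i:i+4]] for i in range(0, len(bc), 4))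
-- (''.join of the looked-up blocks = flatten of their char lists; the "" default of
--  getD is unreachable under Pre_, where Python's _TABLE[...] would raise KeyError)
def encode_hamming_alt (bc : String) : String :=
  let l := bc.toList ++ PySem.List.pyRepeat ['0'] (PySem.Int.mod (-(bc.toList.length : Int)) 4)
  String.ofList (((PySem.List.pyRange 0 (l.length : Int) 4).map
      (fun i => (PySem.Dict.getD pvTable
          (String.ofList (PySem.List.slice l (some i) (some (i + 4)))) "").toList)).flatten)

-- ===== PRECONDITION & SPEC =====
-- Pre_ admits true bitstrings. Excluded: strings with a non-digit char (there A raises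
-- ValueError in int()), and digit strings containing '2'..'9', on which A still returns a
-- garbage multi-digit "block" while B's table lookup raises KeyError (see claim cites).
def Pre_encode_hamming (bc : String) : Prop := (bc.toList.all (fun c => c == '0' || c == '1')) = true
instance (bc : String) : Decidable (Pre_encode_hamming bc) := by unfold Pre_encode_hamming; infer_instance

def pvWitness_encode_hamming : String := "1011"

def Spec_encode_hamming (bc : String) (out : String) : Prop := out = encode_hamming_alt bc
instance (bc : String) (out : String) : Decidable (Spec_encode_hamming bc out) := by unfold Spec_encode_hamming; infer_instance

-- ===== CLAIM (what is proved, stated in full; the proofs are below) =====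
def Claim_equal_encode_hamming : Prop := ∀ (bc : String), Dom_encode_hamming bc → Pre_encode_hamming bc → Spec_encode_hamming bc (encode_hamming bc)

-- ===== LEMMAS AND PROOFS =====

-- A's while-loop pad equals B's arithmetic pad
lemma padA_eq' (l : List Char) :
    padA l = l ++ List.replicate ((4 - l.length % 4) % 4) '0' := by
  fun_induction padA l with
  | case1 l h ih =>
      rw [ih]
      have hk : (4 - l.length % 4) % 4 = (4 - (l.length + 1) % 4) % 4 + 1 := by omega
      rw [hk, List.replicate_succ]
      simp [List.length_append]
  | case2 l h =>
      have : (4 - l.length % 4) % 4 = 0 := by omega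
      simp [this]

-- A's while-loop pad equals B's arithmetic pad
lemma padA_eq (l : List Char) :
    padA l = l ++ List.replicate ((PySem.Int.mod (-(l.length : Int)) 4).toNat) '0' := by
  rw [padA_eq', PySem.Int.mod_eq_emod_of_pos (by norm_num : (0:Int) < 4)]
  have : ((-(l.length : Int)) % 4).toNat = (4 - l.length % 4) % 4 := by omega
  rw [this]

lemma length_padA_mod (l : List Char) : (padA l).length % 4 = 0 := by
  rw [padA_eq']; simp [List.length_append]; omega

lemma mem_padA {l : List Char} {c : Char} (h : c ∈ padA l) : c ∈ l ∨ c = '0' := by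
  rw [padA_eq'] at h
  rcases List.mem_append.1 h with h' | h'
  · exact Or.inl h'
  · exact Or.inr (List.eq_of_mem_replicate h')

lemma exists_four {α : Type} (xs : List α) (h : 4 ≤ xs.length) :
    ∃ a b c d t, xs = a :: b :: c :: d :: t := by
  match xs with
  | a :: b :: c :: d :: t => exact ⟨a, b, c, d, t, rfl⟩
  | [] | [_] | [_, _] | [_, _, _] => simp at h

-- per-group: A's arithmetic block equals B's table entry, for every 4-bit group
lemma chunk_eq (c1 c2 c3 c4 : Char)
    (h1 : c1 = '0' ∨ c1 = '1') (h2 : c2 = '0' ∨ c2 = '1')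
    (h3 : c3 = '0' ∨ c3 = '1') (h4 : c4 = '0' ∨ c4 = '1') :
    blockA [c1, c2, c3, c4]
      = (PySem.Dict.getD pvTable (String.ofList [c1, c2, c3, c4]) "").toList := by
  rcases h1 with rfl | rfl <;> rcases h2 with rfl | rfl <;>
    rcases h3 with rfl | rfl <;> rcases h4 with rfl | rfl <;> decide

-- ===== VERDICT (by name: the statement is the Claim_ definition above) =====
theorem encode_hamming_spec : Claim_equal_encode_hamming := by
  intro bc _ hpre
  have hpre' : ∀ c ∈ bc.toList, c = '0' ∨ c = '1' := by
    intro c hc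
    have := List.all_eq_true.mp hpre c hc
    simpa using this
  unfold Spec_encode_hamming encode_hamming encode_hamming_alt
  rw [PySem.List.pyRepeat_singleton, ← padA_eq]
  set P := padA bc.toList with hP
  have hbit : ∀ c ∈ P, c = '0' ∨ c = '1' := by
    intro c hc
    rcases mem_padA hc with h' | h'
    · exact hpre' c h'
    · exact Or.inl h'
  have hmod : P.length % 4 = 0 := length_padA_mod bc.toList
  dsimp only
  rw [PySem.List.foldl_append_eq_flatMap, List.nil_append, List.flatMap_def]
  refine congrArg String.ofList (congrArg List.flatten (List.map_congr_left ?_))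
  intro i hi
  rw [PySem.List.mem_pyRange_iff_of_pos (by norm_num : (0:Int) < 4)] at hi
  obtain ⟨h0, hlt, hdvd⟩ := hi
  have hdvd' : (4 : Int) ∣ i := by simpa using hdvd
  have hle : i.toNat + 4 ≤ P.length := by omega
  rw [PySem.List.slice_toNat P h0 (by omega)]
  have h4 : (i + 4).toNat - i.toNat = 4 := by omega
  rw [h4]
  obtain ⟨a, b, c, d, t, hdrop⟩ := exists_four (P.drop i.toNat) (by simp; omega)
  have hmem : ∀ x ∈ P.drop i.toNat, x ∈ P := fun x hx => List.mem_of_mem_drop hx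
  rw [hdrop]
  have hmem' : ∀ x ∈ [a, b, c, d], x ∈ P := by
    intro x hx
    apply hmem; rw [hdrop]
    simp at hx
    rcases hx with rfl | rfl | rfl | rfl <;> simp
  simp only [List.take_succ_cons, List.take_zero]
  exact chunk_eq a b c d (hbit a (hmem' a (by simp))) (hbit b (hmem' b (by simp)))
    (hbit c (hmem' c (by simp))) (hbit d (hmem' d (by simp)))
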